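-- pv_equiv track=rewrite | github.com/Chamico/StockAnalyze | program/analyze/analyze.py | get_calculate_last_down
-- ===== SOURCE A (Python) =====
-- def get_calculate_last_down(data):
--     result = 0
--     for index in range(len(data) - 1, -1, -1):
--         if(data[index] < data[index - 1]):
--             result += 1
--         elif(data[index] > data[index - 1]):
--             break
--         else:
--             pass
--
--     return result
-- ===== SOURCE B (Python) =====
-- def get_calculate_last_down(data):
--     n = len(data)
--     signs = [(-1 if data[i] < data[i - 1] else (1 if data[i] > data[i - 1] else 0))
--              for i in range(n)]
--     last_up = -1
--     for i, s in enumerate(signs):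
--         if s == 1:
--             last_up = i
--     return signs[last_up + 1:].count(-1)
-- ===== Notes on version B (the rewrite author's own statement) =====
-- stated objective: alternative
-- what changed: A's single backward loop with a break is replaced by a three-stage decomposition: build the full list of pairwise direction signs (with the same index-0 wraparound), find the index of the last upward step (default -1), and count the downward signs after that boundary.
import Mathlib
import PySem

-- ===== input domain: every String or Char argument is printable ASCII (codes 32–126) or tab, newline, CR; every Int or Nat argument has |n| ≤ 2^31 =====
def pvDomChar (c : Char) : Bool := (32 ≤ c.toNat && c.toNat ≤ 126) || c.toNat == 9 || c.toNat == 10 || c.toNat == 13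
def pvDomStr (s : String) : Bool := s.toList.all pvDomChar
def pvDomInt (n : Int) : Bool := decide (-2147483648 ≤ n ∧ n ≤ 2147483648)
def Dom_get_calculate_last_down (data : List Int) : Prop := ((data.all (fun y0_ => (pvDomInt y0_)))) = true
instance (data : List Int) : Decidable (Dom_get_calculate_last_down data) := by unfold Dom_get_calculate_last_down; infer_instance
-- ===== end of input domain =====

-- B re-decomposes A's backward break-loop as build-sign-table / find-last-up / count (alternative decomposition, same cost).

-- ===== PORT A =====
-- the backward loop with break: recursion over the index list, accumulator = result
def pvGoA (data : List Int) : List Int → Int → Int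
  | [], r => r
  | i :: rest, r =>
    match PySem.List.pyGet? data i, PySem.List.pyGet? data (i - 1) with
    | some x, some y =>
      if x < y then pvGoA data rest (r + 1)
      else if x > y then r
      else pvGoA data rest r
    | _, _ => r   -- unreachable: indices produced by range(len(data)-1, -1, -1) are always in range

def get_calculate_last_down (data : List Int) : Int :=
  pvGoA data (PySem.List.pyRange ((data.length : Int) - 1) (-1) (-1)) 0

-- ===== PORT B =====
-- B's sign of step i: -1 down, 1 up, 0 equal (i = 0 wraps to data[-1], as in Python)
def pvSign (data : List Int) (i : Int) : Int :=
  match PySem.List.pyGet? data i, PySem.List.pyGet? data (i - 1) with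
  | some x, some y => if x < y then -1 else if x > y then 1 else 0
  | _, _ => 0   -- unreachable for i in range(len(data))

def get_calculate_last_down_alt (data : List Int) : Int :=
  let signs := (PySem.List.pyRange 0 (data.length : Int) 1).map (pvSign data)
  let lastUp : Int := (PySem.List.enumerate signs 0).foldl
    (fun acc p => if p.2 = 1 then p.1 else acc) (-1)
  ((PySem.List.slice signs (some (lastUp + 1)) none).count (-1) : Int)

-- ===== PRECONDITION & SPEC =====
def Spec_get_calculate_last_down (data : List Int) (out : Int) : Prop := out = get_calculate_last_down_alt data
instance (data : List Int) (out : Int) : Decidable (Spec_get_calculate_last_down data out) := by unfold Spec_get_calculate_last_down; infer_instance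

-- ===== CLAIM (what is proved, stated in full; the proofs are below) =====
def Claim_equal_get_calculate_last_down : Prop := ∀ (data : List Int), Dom_get_calculate_last_down data → Spec_get_calculate_last_down data (get_calculate_last_down data)

-- ===== LEMMAS AND PROOFS =====

-- common value: trailing-down count of a sign list processed back-to-front
def pvCntRev : List Int → Int
  | [] => 0
  | s :: rest => if s = -1 then pvCntRev rest + 1 else if s = 1 then 0 else pvCntRev rest

def pvLastUp (l : List Int) : Int :=
  (PySem.List.enumerate l 0).foldl (fun acc p => if p.2 = 1 then p.1 else acc) (-1)

theorem pvLastUp_append (l : List Int) (s : Int) :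
    pvLastUp (l ++ [s]) = if s = 1 then (l.length : Int) else pvLastUp l := by
  unfold pvLastUp
  rw [PySem.List.enumerate_append, List.foldl_append]
  simp [PySem.List.enumerate_cons]

theorem pvLastUp_bounds (l : List Int) : -1 ≤ pvLastUp l ∧ pvLastUp l < l.length := by
  induction l using List.reverseRecOn with
  | nil => simp [pvLastUp, PySem.List.enumerate_nil]
  | append_singleton l s ih =>
    rw [pvLastUp_append]
    rcases ih with ⟨h1, h2⟩
    split
    · simp
    · simp
      omega

-- the B computation on an arbitrary sign list equals pvCntRev of its reverse
theorem pvB_eq_cntRev (l : List Int) :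
    ((PySem.List.slice l (some (pvLastUp l + 1)) none).count (-1) : Int) = pvCntRev l.reverse := by
  induction l using List.reverseRecOn with
  | nil => decide
  | append_singleton l s ih =>
    have hb := pvLastUp_bounds l
    rw [pvLastUp_append, List.reverse_append]
    by_cases hs : s = 1
    · subst hs
      rw [if_pos rfl, PySem.List.slice_from _ (by omega)]
      have h1 : ((l.length : Int) + 1).toNat = l.length + 1 := by omega
      rw [h1, List.drop_of_length_le (by simp)]
      simp [pvCntRev]
    · rw [if_neg hs, PySem.List.slice_from _ (by omega)]
      rw [PySem.List.slice_from _ (by omega)] at ih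
      have htle : (pvLastUp l + 1).toNat ≤ l.length := by omega
      rw [List.drop_append_of_le_length htle, List.count_append]
      by_cases hm : s = -1
      · subst hm
        simp [pvCntRev]
        omega
      · simp [pvCntRev, hs, hm]
        omega

-- one iteration of A's loop, phrased with B's sign function
theorem pvStep (data : List Int) (i : Int) (x y : Int)
    (hx : PySem.List.pyGet? data i = some x) (hy : PySem.List.pyGet? data (i - 1) = some y)
    (rest : List Int) (r : Int) :
    pvGoA data (i :: rest) r =
      if pvSign data i = -1 then pvGoA data rest (r + 1)
      else if pvSign data i = 1 then r else pvGoA data rest r := by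
  simp only [pvGoA, pvSign, hx, hy]
  rcases lt_trichotomy x y with h | h | h
  · simp [h]
  · simp [h]
  · simp [h, lt_asymm h]

-- the A loop on indices [k, k-1, …, 0] computes pvCntRev of the reversed sign prefix
theorem pvA_loop (data : List Int) (hne : data ≠ []) (k : ℕ) (hk : k < data.length) :
    ∀ r, pvGoA data (PySem.List.pyRange (k : Int) (-1) (-1)) r
      = r + pvCntRev ((List.range (k + 1)).reverse.map (fun j : ℕ => pvSign data (j : Int))) := by
  induction k with
  | zero =>
    intro r
    have h0 : ((0 : ℕ) : Int) = 0 := rfl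
    rw [h0, PySem.List.pyRange_neg_one_cons (by omega), PySem.List.pyRange_neg_one_eq_nil (by omega)]
    have hk0 : 0 < data.length := by omega
    obtain ⟨y, hy⟩ := Option.isSome_iff_exists.mp (List.getLast?_isSome.mpr hne)
    have hx : PySem.List.pyGet? data (0 : Int) = some data[0] := by
      rw [PySem.List.pyGet?_zero, List.getElem?_eq_getElem hk0]
    have hym : PySem.List.pyGet? data ((0 : Int) - 1) = some y := by
      norm_num [PySem.List.pyGet?_neg_one, hy]
    rw [pvStep data 0 _ _ hx hym]
    split_ifs with h1 h2
    · simp [pvGoA, pvCntRev, h1]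
    · simp [pvCntRev, h2]
    · simp [pvGoA, pvCntRev, h1, h2]
  | succ k ih =>
    intro r
    have hk' : k < data.length := by omega
    have hk1 : k + 1 < data.length := hk
    have hc : ((k + 1 : ℕ) : Int) = (k : Int) + 1 := by push_cast; ring
    rw [hc, PySem.List.pyRange_neg_one_cons (by omega)]
    have hx : PySem.List.pyGet? data ((k : Int) + 1) = some data[k + 1] := by
      rw [← hc, PySem.List.pyGet?_natCast, List.getElem?_eq_getElem hk1]
    have hym : PySem.List.pyGet? data (((k : Int) + 1) - 1) = some data[k] := by
      rw [show ((k : Int) + 1) - 1 = ((k : ℕ) : Int) by ring, PySem.List.pyGet?_natCast,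
        List.getElem?_eq_getElem hk']
    rw [pvStep data ((k : Int) + 1) _ _ hx hym]
    have hr : (List.range (k + 1 + 1)).reverse.map (fun j : ℕ => pvSign data (j : Int))
        = pvSign data ((k : Int) + 1)
          :: (List.range (k + 1)).reverse.map (fun j : ℕ => pvSign data (j : Int)) := by
      rw [List.range_succ, List.reverse_append]
      simp [hc]
    rw [hr, show ((k : Int) + 1) - 1 = (k : Int) by ring]
    split_ifs with h1 h2
    · rw [ih hk' _]
      simp [pvCntRev, h1]
      omega
    · simp [pvCntRev, h2]
    · rw [ih hk' _]
      simp [pvCntRev, h1, h2]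

-- B's whole computation, as pvCntRev of the reversed sign table
theorem pvAlt_eq (data : List Int) :
    get_calculate_last_down_alt data
      = pvCntRev (((List.range data.length).map (fun j : ℕ => pvSign data (j : Int))).reverse) := by
  unfold get_calculate_last_down_alt
  have hsigns : (PySem.List.pyRange 0 (data.length : Int) 1).map (pvSign data)
      = (List.range data.length).map (fun j : ℕ => pvSign data (j : Int)) := by
    rw [PySem.List.pyRange_zero_natCast, List.map_map]
    rfl
  simp only [hsigns]
  exact pvB_eq_cntRev _

-- A's whole computation, as pvCntRev of the reversed sign table
theorem pvA_eq (data : List Int) :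
    get_calculate_last_down data
      = pvCntRev (((List.range data.length).map (fun j : ℕ => pvSign data (j : Int))).reverse) := by
  unfold get_calculate_last_down
  cases data with
  | nil => simp [PySem.List.pyRange_neg_one_eq_nil, pvGoA, pvCntRev]
  | cons a t =>
    have hlen : (((a :: t).length : ℕ) : Int) - 1 = ((t.length : ℕ) : Int) := by
      simp
    rw [hlen, pvA_loop (a :: t) (by simp) t.length (by simp) 0, ← List.map_reverse]
    simp

-- ===== VERDICT (by name: the statement is the Claim_ definition above) =====
theorem get_calculate_last_down_spec : Claim_equal_get_calculate_last_down := by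
  intro data _
  unfold Spec_get_calculate_last_down
  rw [pvA_eq, pvAlt_eq]
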